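-- pv_equiv track=rewrite | github.com/greenstar1151/Baekjoon | 2302_극장 좌석/2302_극장 좌석_251015.py | solution
-- ===== SOURCE A (Python) =====
-- from functools import cache, reduce  # type: ignore # noqa: F401
-- from operator import mul
--
-- def solution(n: int, fixed: set[int]):
--     DP = [0] * (n + 1)
--     DP[0], DP[1] = 1, 1
--     for i in range(2, n + 1):
--         DP[i] = DP[i - 1] + DP[i - 2]
--
--     counter = 0
--     segments: list[int] = []
--     for i in range(1, n + 1):
--         if i in fixed:
--             if counter > 0:
--                 segments.append(counter)
--             counter = 0
--         else:
--             counter += 1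
--     else:
--         if counter > 0:
--             segments.append(counter)
--     return reduce(mul, (DP[seg] for seg in segments + [1]))
-- ===== SOURCE B (Python) =====
-- def solution(n, fixed):
--     def fib(k):  # fib(0)=1, fib(1)=1, fib(k)=fib(k-1)+fib(k-2)
--         a, b = 1, 1
--         for _ in range(k):
--             a, b = b, a + b
--         return a
--     bounds = [0] + sorted({x for x in fixed if 1 <= x <= n}) + [n + 1]
--     result = 1
--     for prev, nxt in zip(bounds, bounds[1:]):
--         result *= fib(nxt - prev - 1)
--     return result
-- ===== Notes on version B (the rewrite author's own statement) =====
-- stated objective: alternative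
-- what changed: Replaces the DP table plus seat-by-seat membership scan with a sort of the in-range fixed seats: gap lengths are read off consecutive sorted boundaries (0 and n+1 added) and each gap's Fibonacci value is computed by a two-variable loop, no table and no per-seat scan.
import Mathlib
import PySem

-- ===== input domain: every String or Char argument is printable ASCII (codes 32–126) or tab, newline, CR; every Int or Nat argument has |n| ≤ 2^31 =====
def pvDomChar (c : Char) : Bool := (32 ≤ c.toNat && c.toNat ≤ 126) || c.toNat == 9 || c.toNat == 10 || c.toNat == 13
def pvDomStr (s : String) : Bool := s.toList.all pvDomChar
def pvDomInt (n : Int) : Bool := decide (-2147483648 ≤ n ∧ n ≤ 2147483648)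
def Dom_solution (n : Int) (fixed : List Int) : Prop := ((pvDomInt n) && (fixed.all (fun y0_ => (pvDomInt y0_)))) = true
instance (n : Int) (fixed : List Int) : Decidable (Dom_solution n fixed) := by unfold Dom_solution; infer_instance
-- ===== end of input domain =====

-- B replaces A's DP table + per-seat membership scan by sorting the in-range fixed seats and
-- multiplying a two-variable Fibonacci loop over consecutive boundary gaps (alternative decomposition, not claimed faster).


-- ===== PORT A =====
def solution (n : Int) (fixed : List Int) : Int :=
  -- DP = [0]*(n+1); DP[0], DP[1] = 1, 1
  let dp0 : List Int := ((List.replicate (n + 1).toNat (0 : Int)).set 0 1).set 1 1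
  -- for i in range(2, n+1): DP[i] = DP[i-1] + DP[i-2]
  let DP : List Int := (PySem.List.pyRange 2 (n + 1) 1).foldl
    (fun dp i => dp.set i.toNat (PySem.List.pyGetD dp (i - 1) 0 + PySem.List.pyGetD dp (i - 2) 0)) dp0
  -- scan seats 1..n accumulating (counter, segments)
  let st : Int × List Int := (PySem.List.pyRange 1 (n + 1) 1).foldl
    (fun st i =>
      if fixed.contains i then (0, if st.1 > 0 then st.2 ++ [st.1] else st.2)
      else (st.1 + 1, st.2)) (0, ([] : List Int))
  let segments : List Int := if st.1 > 0 then st.2 ++ [st.1] else st.2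
  -- reduce(mul, (DP[seg] for seg in segments + [1])): the list is non-empty; folding with initial 1 multiplies the same factors
  (segments ++ [1]).foldl (fun acc s => acc * PySem.List.pyGetD DP s 0) 1

-- ===== PORT B =====
-- def fib(k): a, b = 1, 1; for _ in range(k): a, b = b, a+b; return a
def fibLoop (k : Int) : Int :=
  ((List.range k.toNat).foldl (fun (p : Int × Int) _ => (p.2, p.1 + p.2)) (1, 1)).1

def solution_alt (n : Int) (fixed : List Int) : Int :=
  -- bounds = [0] + sorted({x for x in fixed if 1 <= x <= n}) + [n+1]
  let bounds : List Int :=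
    0 :: (PySem.List.sorted (PySem.Set.ofList (fixed.filter (fun x => 1 ≤ x && x ≤ n))) (fun x => x) false ++ [n + 1])
  -- for prev, nxt in zip(bounds, bounds[1:]): result *= fib(nxt - prev - 1)
  (bounds.zip bounds.tail).foldl (fun acc q => acc * fibLoop (q.2 - q.1 - 1)) 1

-- ===== PRECONDITION & SPEC =====
-- A raises IndexError while initialising DP for n ≤ 0 (DP[0]/DP[1] out of range); Pre_ keeps exactly the inputs where A returns.
def Pre_solution (n : Int) (fixed : List Int) : Prop := 1 ≤ n
instance (n : Int) (fixed : List Int) : Decidable (Pre_solution n fixed) := by unfold Pre_solution; infer_instance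
def pvWitness_solution : Int × List Int := (3, [2])

def Spec_solution (n : Int) (fixed : List Int) (out : Int) : Prop := out = solution_alt n fixed
instance (n : Int) (fixed : List Int) (out : Int) : Decidable (Spec_solution n fixed out) := by unfold Spec_solution; infer_instance

-- ===== CLAIM (what is proved, stated in full; the proofs are below) =====
def Claim_equal_solution : Prop := ∀ (n : Int) (fixed : List Int), Dom_solution n fixed → Pre_solution n fixed → Spec_solution n fixed (solution n fixed)

-- ===== LEMMAS AND PROOFS =====
-- mathematical Fibonacci with fibP 0 = fibP 1 = 1
def fibP : Nat → Int
  | 0 => 1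
  | 1 => 1
  | (k+2) => fibP k + fibP (k+1)

-- the free-gap lengths between boundary a-1 and the sorted fixed seats S, up to boundary n+1 (only positive ones kept)
def gapsL (n : Int) : Int → List Int → List Int
  | a, [] => if 0 < n + 1 - a then [n + 1 - a] else []
  | a, m :: S => (if 0 < m - a then [m - a] else []) ++ gapsL n (m + 1) S

def prodFib (l : List Int) : Int := (l.map (fun s => fibP s.toNat)).prod

def stepF (S : List Int) (st : Int × List Int) (i : Int) : Int × List Int :=
  if S.contains i then (0, if st.1 > 0 then st.2 ++ [st.1] else st.2) else (st.1 + 1, st.2)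

def finalize (st : Int × List Int) : List Int := if st.1 > 0 then st.2 ++ [st.1] else st.2

theorem gapsL_nil (n a : Int) : gapsL n a [] = if 0 < n + 1 - a then [n + 1 - a] else [] := rfl

theorem gapsL_cons (n a m : Int) (S : List Int) :
    gapsL n a (m :: S) = (if 0 < m - a then [m - a] else []) ++ gapsL n (m + 1) S := rfl

theorem fibP_add2 (k : Nat) : fibP (k + 2) = fibP k + fibP (k + 1) := rfl

theorem fib_pair (m : Nat) :
    (List.range m).foldl (fun (p : Int × Int) _ => (p.2, p.1 + p.2)) (1, 1) = (fibP m, fibP (m + 1)) := by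
  induction m with
  | zero => rfl
  | succ m ih => rw [List.range_succ, List.foldl_append, ih]; simp [fibP_add2]

theorem fibLoop_eq (k : Int) : fibLoop k = fibP k.toNat := by
  unfold fibLoop; rw [fib_pair]

theorem prodFib_append (a b : List Int) : prodFib (a ++ b) = prodFib a * prodFib b := by
  simp [prodFib]

theorem set_append_length {α : Type} (xs : List α) (y : α) (ys : List α) (v : α) :
    (xs ++ y :: ys).set xs.length v = xs ++ v :: ys := by
  induction xs with
  | nil => rfl
  | cons x xs ih => simp [ih]

theorem foldl_mul_map (l : List Int) (g : Int → Int) (init : Int) :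
    l.foldl (fun acc s => acc * g s) init = init * (l.map g).prod := by
  induction l generalizing init with
  | nil => simp
  | cons x l ih => simp [List.foldl_cons, ih, mul_assoc]

-- DP-table correctness
theorem dp_fold (n : Int) (d : Nat) : ∀ (i : Int), 2 ≤ i → i + d = n + 1 →
    (PySem.List.pyRange i (n + 1) 1).foldl
      (fun dp j => dp.set j.toNat (PySem.List.pyGetD dp (j - 1) 0 + PySem.List.pyGetD dp (j - 2) 0))
      ((List.range i.toNat).map fibP ++ List.replicate d 0)
    = (List.range (n + 1).toNat).map fibP := by
  induction d with
  | zero =>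
    intro i h2 hi
    have : i = n + 1 := by omega
    subst this
    rw [PySem.List.pyRange_one_eq_nil (by omega)]
    simp
  | succ d ih =>
    intro i h2 hi
    rw [PySem.List.pyRange_one_cons (by omega), List.foldl_cons]
    have hlen : ((List.range i.toNat).map fibP).length = i.toNat := by simp
    have hget1 : PySem.List.pyGetD ((List.range i.toNat).map fibP ++ List.replicate (d+1) 0) (i - 1) 0
        = fibP (i - 1).toNat := by
      rw [PySem.List.pyGetD_eq_getElem _ 0 (by omega) (by simp; omega)]
      rw [List.getElem_append_left (by simp; omega)]
      simp
    have hget2 : PySem.List.pyGetD ((List.range i.toNat).map fibP ++ List.replicate (d+1) 0) (i - 2) 0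
        = fibP (i - 2).toNat := by
      rw [PySem.List.pyGetD_eq_getElem _ 0 (by omega) (by simp; omega)]
      rw [List.getElem_append_left (by simp; omega)]
      simp
    rw [hget1, hget2]
    have hrep : List.replicate (d+1) (0:Int) = 0 :: List.replicate d 0 := rfl
    have hset : (((List.range i.toNat).map fibP ++ List.replicate (d+1) 0).set i.toNat
          (fibP (i-1).toNat + fibP (i-2).toNat))
        = (List.range (i+1).toNat).map fibP ++ List.replicate d 0 := by
      rw [hrep]
      have := set_append_length ((List.range i.toNat).map fibP) (0:Int) (List.replicate d 0)
        (fibP (i-1).toNat + fibP (i-2).toNat)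
      rw [hlen] at this
      rw [this]
      have hv : fibP (i-1).toNat + fibP (i-2).toNat = fibP i.toNat := by
        have h1 : i.toNat = (i-2).toNat + 2 := by omega
        have h2 : (i-1).toNat = (i-2).toNat + 1 := by omega
        rw [h1, h2, fibP_add2]; ring
      have hr : (i+1).toNat = i.toNat + 1 := by omega
      rw [hv, hr, List.range_succ]
      simp
    rw [hset]
    exact ih (i+1) (by omega) (by omega)

theorem dp0_eq (n : Int) (hn : 1 ≤ n) :
    ((List.replicate (n + 1).toNat (0 : Int)).set 0 1).set 1 1
      = (List.range (2:Int).toNat).map fibP ++ List.replicate (n - 1).toNat 0 := by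
  have h : (n + 1).toNat = (n - 1).toNat + 2 := by omega
  rw [h]
  have hrep : List.replicate ((n-1).toNat + 2) (0:Int) = 0 :: 0 :: List.replicate (n-1).toNat 0 := rfl
  rw [hrep]
  simp [List.set, List.range_succ, fibP]

-- a run of free seats just increments the counter
theorem free_run (S : List Int) : ∀ (l : List Int), (∀ x ∈ l, S.contains x = false) →
    ∀ (c : Int) (segs : List Int), l.foldl (stepF S) (c, segs) = (c + (l.length : Int), segs) := by
  intro l
  induction l with
  | nil => intro _ c segs; simp
  | cons x l ih =>
    intro h c segs
    rw [List.foldl_cons]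
    have hx : S.contains x = false := h x (by simp)
    simp only [stepF, hx, Bool.false_eq_true, if_false]
    rw [ih (fun y hy => h y (by simp [hy])) (c+1) segs]
    congr 1
    simp; ring

-- the seat scan produces exactly the sorted-gap lengths
theorem scan_fold (n : Int) : ∀ (S : List Int), S.Pairwise (· < ·) →
    ∀ (a : Int), (∀ x ∈ S, a ≤ x ∧ x ≤ n) → a ≤ n + 1 → ∀ (segs0 : List Int),
    finalize ((PySem.List.pyRange a (n + 1) 1).foldl (stepF S) (0, segs0)) = segs0 ++ gapsL n a S := by
  intro S
  induction S with
  | nil =>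
    intro _ a _ ha segs0
    rw [free_run [] (PySem.List.pyRange a (n+1) 1) (by intro x hx; simp) 0 segs0]
    unfold finalize
    rw [gapsL_nil, PySem.List.length_pyRange_one]
    have h2 : (((n + 1 - a).toNat : Int)) = n + 1 - a := by omega
    rw [zero_add, h2]
    split_ifs with h1 <;> simp
  | cons m S ih =>
    intro hp a hmem ha segs0
    obtain ⟨hm1, hm2⟩ := hmem m (by simp)
    have hpS : S.Pairwise (· < ·) := hp.of_cons
    have hgt : ∀ x ∈ S, m < x := fun x hx => (List.pairwise_cons.mp hp).1 x hx
    rw [PySem.List.pyRange_one_append a m (n+1) (by omega) (by omega), List.foldl_append]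
    rw [free_run (m :: S) (PySem.List.pyRange a m 1) ?hfree 0 segs0]
    case hfree =>
      intro x hx
      have hxr := PySem.List.mem_pyRange_one.mp hx
      have hxm : x ≠ m := by omega
      have hxs : x ∉ S := fun hmm => by have := hgt x hmm; omega
      simp [hxm, hxs]
    rw [PySem.List.pyRange_one_cons (a := m) (b := n+1) (by omega), List.foldl_cons]
    have hc : (m :: S).contains m = true := by simp
    simp only [stepF, hc, if_true]
    have hlen : (0:Int) + ((PySem.List.pyRange a m 1).length : Int) = m - a := by
      rw [PySem.List.length_pyRange_one]; omega
    rw [hlen]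
    have hcongr : ∀ init : Int × List Int, (PySem.List.pyRange (m+1) (n+1) 1).foldl (stepF (m :: S)) init = (PySem.List.pyRange (m+1) (n+1) 1).foldl (stepF S) init := by
      intro init
      apply PySem.List.foldl_congr_mem
      intro acc x hx
      have hxr := PySem.List.mem_pyRange_one.mp hx
      unfold stepF
      have hxm : x ≠ m := by omega
      simp [hxm]
    rw [hcongr]
    rw [ih hpS (m+1) (fun x hx => ⟨by have := hgt x hx; omega, (hmem x (by simp [hx])).2⟩) (by omega)]
    show (if m - a > 0 then segs0 ++ [m - a] else segs0) ++ gapsL n (m+1) S = segs0 ++ gapsL n a (m :: S)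
    rw [gapsL_cons]
    split_ifs with h1 <;> simp

-- every gap length is a valid DP index
theorem gaps_bounds (n : Int) : ∀ (S : List Int), S.Pairwise (· < ·) → ∀ (a : Int), 1 ≤ a → (∀ x ∈ S, a ≤ x ∧ x ≤ n) →
    ∀ x ∈ gapsL n a S, 0 < x ∧ x ≤ n := by
  intro S
  induction S with
  | nil =>
    intro _ a ha _ x hx
    rw [gapsL_nil] at hx
    split_ifs at hx with h
    · simp at hx; omega
    · simp at hx
  | cons m S ih =>
    intro hp a ha hmem x hx
    obtain ⟨hm1, hm2⟩ := hmem m (by simp)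
    have hgt : ∀ y ∈ S, m < y := fun y hy => (List.pairwise_cons.mp hp).1 y hy
    rw [gapsL_cons, List.mem_append] at hx
    rcases hx with hx | hx
    · split_ifs at hx with h
      · simp at hx; omega
      · simp at hx
    · exact ih hp.of_cons (m+1) (by omega)
        (fun y hy => ⟨by have := hgt y hy; omega, (hmem y (by simp [hy])).2⟩) x hx

-- B's zip-fold computes the product of Fibonacci values over the gaps
theorem b_fold (n : Int) : ∀ (S : List Int), ∀ (p : Int) (acc : Int),
    (((p :: (S ++ [n+1])).zip (S ++ [n+1])).foldl (fun acc q => acc * fibLoop (q.2 - q.1 - 1)) acc)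
    = acc * prodFib (gapsL n (p+1) S) := by
  intro S
  induction S with
  | nil =>
    intro p acc
    show acc * fibLoop (n + 1 - p - 1) = acc * prodFib (gapsL n (p+1) [])
    rw [fibLoop_eq, gapsL_nil]
    split_ifs with h
    · have he : (n + 1 - p - 1).toNat = (n + 1 - (p + 1)).toNat := by omega
      rw [he]
      simp [prodFib]
    · have he : (n + 1 - p - 1).toNat = 0 := by omega
      rw [he]
      simp [prodFib, fibP]
  | cons m S ih =>
    intro p acc
    show ((m :: (S ++ [n+1])).zip (S ++ [n+1])).foldl (fun acc q => acc * fibLoop (q.2 - q.1 - 1)) (acc * fibLoop (m - p - 1)) = _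
    rw [ih m (acc * fibLoop (m - p - 1))]
    rw [gapsL_cons, prodFib_append, fibLoop_eq]
    split_ifs with h
    · have he : (m - p - 1).toNat = (m - (p + 1)).toNat := by omega
      rw [he]
      simp only [prodFib, List.map_cons, List.map_nil, List.prod_cons, List.prod_nil, mul_one]
      ring
    · have he : (m - p - 1).toNat = 0 := by omega
      rw [he]
      simp only [prodFib, List.map_nil, List.prod_nil, one_mul]
      show acc * fibP 0 * _ = _
      simp [fibP]

-- ===== VERDICT (by name: the statement is the Claim_ definition above) =====
theorem solution_spec : Claim_equal_solution := by
  intro n fixed _ hpre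
  unfold Spec_solution solution solution_alt
  have hn : 1 ≤ n := hpre
  set S : List Int := PySem.List.sorted (PySem.Set.ofList (fixed.filter (fun x => 1 ≤ x && x ≤ n))) (fun x => x) false with hSdef
  have hSp : S.Pairwise (· < ·) := PySem.List.sorted_ofList_pairwise_lt _
  have hSmem : ∀ x : Int, x ∈ S ↔ x ∈ fixed ∧ 1 ≤ x ∧ x ≤ n := by
    intro x
    rw [hSdef, PySem.List.mem_sorted, PySem.Set.mem_ofList, List.mem_filter]
    simp
  -- B side
  have hB : (let bounds : List Int := 0 :: (S ++ [n + 1]);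
      (bounds.zip bounds.tail).foldl (fun acc q => acc * fibLoop (q.2 - q.1 - 1)) 1)
      = prodFib (gapsL n 1 S) := by
    show (((0 : Int) :: (S ++ [n+1])).zip (S ++ [n+1])).foldl _ 1 = _
    rw [b_fold n S 0 1]
    norm_num
  -- A side: DP table
  have hDP : (PySem.List.pyRange 2 (n + 1) 1).foldl
      (fun dp j => dp.set j.toNat (PySem.List.pyGetD dp (j - 1) 0 + PySem.List.pyGetD dp (j - 2) 0))
      (((List.replicate (n + 1).toNat (0 : Int)).set 0 1).set 1 1)
      = (List.range (n + 1).toNat).map fibP := by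
    rw [dp0_eq n hn]
    exact dp_fold n (n-1).toNat 2 (by omega) (by omega)
  -- A side: scan
  have hScanCongr : (PySem.List.pyRange 1 (n + 1) 1).foldl
      (fun st i => if fixed.contains i then ((0:Int), if st.1 > 0 then st.2 ++ [st.1] else st.2)
        else (st.1 + 1, st.2)) (0, ([] : List Int))
      = (PySem.List.pyRange 1 (n + 1) 1).foldl (stepF S) (0, ([] : List Int)) := by
    apply PySem.List.foldl_congr_mem
    intro acc x hx
    have hxr := PySem.List.mem_pyRange_one.mp hx
    unfold stepF
    have : fixed.contains x = S.contains x := by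
      by_cases hxf : x ∈ fixed
      · have : x ∈ S := (hSmem x).mpr ⟨hxf, by omega, by omega⟩
        simp [hxf, this]
      · have : x ∉ S := fun hc => hxf ((hSmem x).mp hc).1
        simp [hxf, this]
    rw [this]
  have hScan : finalize ((PySem.List.pyRange 1 (n + 1) 1).foldl (stepF S) (0, ([] : List Int)))
      = gapsL n 1 S := by
    rw [scan_fold n S hSp 1 (fun x hx => by have := (hSmem x).mp hx; omega) (by omega) []]
    simp
  simp only []
  rw [hScanCongr, hDP, hB]
  show (finalize _ ++ [1]).foldl (fun acc s => acc * PySem.List.pyGetD ((List.range (n + 1).toNat).map fibP) s 0) 1 = _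
  rw [hScan, foldl_mul_map, List.map_append]
  have hmapeq : (gapsL n 1 S).map (fun s => PySem.List.pyGetD ((List.range (n + 1).toNat).map fibP) s 0)
      = (gapsL n 1 S).map (fun s => fibP s.toNat) := by
    apply List.map_congr_left
    intro s hs
    have hb := gaps_bounds n S hSp 1 (by omega) (fun x hx => by have := (hSmem x).mp hx; omega) s hs
    rw [PySem.List.pyGetD_eq_getElem _ 0 (by omega) (by simp; omega)]
    rw [List.getElem_map, List.getElem_range]
  rw [hmapeq]
  have hone : (([1] : List Int)).map (fun s => PySem.List.pyGetD ((List.range (n + 1).toNat).map fibP) s 0) = [1] := by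
    simp only [List.map_cons, List.map_nil]
    rw [PySem.List.pyGetD_eq_getElem _ 0 (by omega) (by simp; omega)]
    rw [List.getElem_map, List.getElem_range]
    rfl
  rw [hone]
  simp [prodFib]
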